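-- pv_equiv track=rewrite | github.com/jpgil/logdelay | notebooks/2-structures/clique_discovery.py | cluster_same_freq
-- ===== SOURCE A (Python) =====
-- def cluster_same_freq(pairs_dic):
--     """
--     Group pairs in clusters with same frequency
--
--     >>> T = [ list("ABC"), list("ABCABC") ]
--     >>> cluster_same_freq( get_successor_pairs_by_freq(T) )
--     {3: [('A', 'B'), ('A', 'C'), ('B', 'C')], 1: [('B', 'A'), ('C', 'A'), ('C', 'B')]}
--     """
--     freq = list(set(pairs_dic.values()))
--     groups = {}
--     for pair in pairs_dic.keys():
--         f  = pairs_dic[pair]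
--         if f in groups.keys():
--             groups[f].append( pair )
--         else:
--             groups[f] = [ pair ]
--     return groups
-- ===== SOURCE B (Python) =====
-- def cluster_same_freq(pairs_dic):
--     # Distinct frequencies first (first-occurrence order), then one filter pass per frequency.
--     return {f: [p for p in pairs_dic if pairs_dic[p] == f]
--             for f in dict.fromkeys(pairs_dic.values())}
-- ===== Notes on version B (the rewrite author's own statement) =====
-- stated objective: alternative
-- what changed: A builds the groups incrementally in one pass with an append-or-create dict; B first computes the distinct frequencies (dict.fromkeys of the values) and then builds each group by filtering all keys with that frequency, a distinct-values-outer / filter-inner nested traversal.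
import Mathlib
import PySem

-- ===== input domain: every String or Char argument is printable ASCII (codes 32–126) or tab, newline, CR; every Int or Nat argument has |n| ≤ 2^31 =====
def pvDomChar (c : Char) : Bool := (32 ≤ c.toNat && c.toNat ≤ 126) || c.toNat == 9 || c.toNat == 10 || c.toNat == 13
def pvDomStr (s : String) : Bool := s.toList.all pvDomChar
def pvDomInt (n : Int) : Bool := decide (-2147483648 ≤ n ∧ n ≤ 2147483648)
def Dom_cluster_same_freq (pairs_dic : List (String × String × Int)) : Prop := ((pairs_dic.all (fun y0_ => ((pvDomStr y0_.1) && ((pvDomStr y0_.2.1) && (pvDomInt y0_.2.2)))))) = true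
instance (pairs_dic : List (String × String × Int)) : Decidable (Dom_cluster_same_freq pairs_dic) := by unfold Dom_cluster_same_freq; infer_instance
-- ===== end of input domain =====

-- B replaces A's incremental group-building loop by a distinct-frequencies-outer / filter-inner
-- nested traversal (objective: alternative, same result, no speed claim).

-- ===== PORT A =====
-- the dict argument, as a PySem.Dict (insertion order, last write wins)
def csfDict (pairs_dic : List (String × String × Int)) : PySem.Dict (String × String) Int :=
  PySem.Dict.ofList (pairs_dic.map (fun t => ((t.1, t.2.1), t.2.2)))

def cluster_same_freq (pairs_dic : List (String × String × Int)) : List (Int × List (String × String)) :=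
  let d := csfDict pairs_dic
  let _freq := PySem.Set.ofList d.values   -- A computes 'freq' and never uses it
  let groups := d.keys.foldl
    (fun g pair =>
      let f := d.getD pair 0               -- pair is a key of d, so the lookup succeeds
      if g.contains f then g.modify f [] (fun v => v ++ [pair])   -- groups[f].append(pair)
      else g.insert f [pair])
    PySem.Dict.empty
  groups.items

-- ===== PORT B =====
def cluster_same_freq_alt (pairs_dic : List (String × String × Int)) : List (Int × List (String × String)) :=
  let d := csfDict pairs_dic
  let freqs := PySem.List.dedup d.values   -- dict.fromkeys(pairs_dic.values())
  -- the dict comprehension's keys 'freqs' are distinct, so its items are exactly this map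
  freqs.map (fun f => (f, d.keys.filter (fun p => d.getD p 0 == f)))

-- ===== PRECONDITION & SPEC =====
def Spec_cluster_same_freq (pairs_dic : List (String × String × Int)) (out : List (Int × List (String × String))) : Prop := out = cluster_same_freq_alt pairs_dic
instance (pairs_dic : List (String × String × Int)) (out : List (Int × List (String × String))) : Decidable (Spec_cluster_same_freq pairs_dic out) := by unfold Spec_cluster_same_freq; infer_instance

-- ===== CLAIM (what is proved, stated in full; the proofs are below) =====
def Claim_equal_cluster_same_freq : Prop := ∀ (pairs_dic : List (String × String × Int)), Dom_cluster_same_freq pairs_dic → Spec_cluster_same_freq pairs_dic (cluster_same_freq pairs_dic)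

-- ===== LEMMAS AND PROOFS =====

-- A's if/append/else-create step is exactly Dict.modify with default []
theorem csf_step_eq_modify (g : PySem.Dict Int (List (String × String))) (f : Int)
    (pair : String × String) :
    (if g.contains f then g.modify f [] (fun v => v ++ [pair]) else g.insert f [pair])
      = g.modify f [] (fun v => v ++ [pair]) := by
  by_cases h : g.contains f = true
  · simp [h]
  · simp only [Bool.not_eq_true] at h
    simp [h, PySem.Dict.modify, PySem.Dict.getD_of_not_contains g [] h]

theorem cluster_same_freq_spec : Claim_equal_cluster_same_freq := by
  intro pairs_dic _
  unfold Spec_cluster_same_freq cluster_same_freq cluster_same_freq_alt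
  set d := csfDict pairs_dic with hd
  have hnd : d.keys.Nodup := PySem.Dict.nodup_keys_ofList _
  -- rewrite A's loop step to a plain modify, then to a fold over (freq, key) pairs
  have hstep :
      (d.keys.foldl
        (fun g pair =>
          let f := d.getD pair 0
          if g.contains f then g.modify f [] (fun v => v ++ [pair]) else g.insert f [pair])
        PySem.Dict.empty)
      = ((d.keys.map (fun k => (d.getD k 0, k))).foldl
          (fun g p => g.modify p.1 [] (fun v => v ++ [p.2])) PySem.Dict.empty) := by
    rw [List.foldl_map]
    exact PySem.List.foldl_congr_mem _ _ _ _
      (fun g pair _ => csf_step_eq_modify g (d.getD pair 0) pair)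
  simp only [hstep]
  set L := d.keys.map (fun k => (d.getD k 0, k)) with hL
  set groups := L.foldl (fun g p => g.modify p.1 [] (fun v => v ++ [p.2])) PySem.Dict.empty
    with hg
  have hgnd : groups.keys.Nodup := by
    rw [hg, hL, List.foldl_map]
    exact PySem.Dict.nodup_keys_foldl_modify_key d.keys (fun k => d.getD k 0) []
      (fun _ x v => v ++ [x]) PySem.Dict.empty PySem.Dict.nodup_keys_empty
  -- items of the built dict, pointwise
  rw [PySem.Dict.items_eq_map_keys groups hgnd []]
  have hkeys : groups.keys = PySem.Set.ofList (L.map (·.1)) := by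
    rw [hg, hL, List.foldl_map]
    have := PySem.Dict.keys_foldl_modify_key (l := d.keys) (key := fun k => d.getD k 0)
      (d0 := []) (f := fun _ x v => v ++ [x]) (d := PySem.Dict.empty)
    simpa [PySem.Set.update, PySem.Set.ofList_eq_foldl, List.foldl_map] using this
  have hvals : L.map (·.1) = d.values := by
    rw [hL, List.map_map]
    exact (PySem.Dict.values_eq_map_keys d hnd 0).symm
  have hget : ∀ f : Int, groups.getD f [] = d.keys.filter (fun p => d.getD p 0 == f) := by
    intro f
    rw [hg, PySem.Dict.getD_foldl_modify_append, PySem.Dict.getD_empty]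
    rw [hL, List.filter_map, List.map_map]
    simp [Function.comp_def]
  rw [hkeys, hvals]
  simp only [PySem.List.dedup_eq_ofList]
  exact List.map_congr_left (fun f _ => by rw [hget f])

-- ===== VERDICT (by name: the statement is the Claim_ definition above) =====
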